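-- pv_equiv track=rewrite | github.com/yc1-coder/AI_Is_My_Life | Diabete_RAG/app.py | retrieve_subgraph_by_entities
-- ===== SOURCE A (Python) =====
-- def retrieve_subgraph_by_entities(seed_entities, graph, reverse_graph, max_hops=2, top_k=10):
--     visited = set()
--     subgraph_triplets = []
--     queue = [(e, 0) for e in seed_entities]
--
--     while queue:
--         current_entity, hops = queue.pop(0)
--
--         if current_entity in visited or hops > max_hops:
--             continue
--
--         visited.add(current_entity)
--
--         if current_entity in graph:
--             for rel, tail in graph[current_entity]:
--                 subgraph_triplets.append({
--                     'head_entity': current_entity,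
--                     'relation': rel,
--                     'tail_entity': tail
--                 })
--                 if tail not in visited:
--                     queue.append((tail, hops + 1))
--
--         if current_entity in reverse_graph:
--             for rel, head in reverse_graph[current_entity]:
--                 subgraph_triplets.append({
--                     'head_entity': head,
--                     'relation': rel,
--                     'tail_entity': current_entity
--                 })
--                 if head not in visited:
--                     queue.append((head, hops + 1))
--
--     if len(subgraph_triplets) > top_k * len(seed_entities):
--         subgraph_triplets = subgraph_triplets[:top_k * len(seed_entities)]
--
--     return subgraph_triplets
-- ===== SOURCE B (Python) =====
-- def retrieve_subgraph_by_entities(seed_entities, graph, reverse_graph, max_hops=2, top_k=10):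
--     # Stage 1: compute only the BFS visit order. Each level is expanded to the FULL
--     # (unfiltered) neighbor list of the freshly visited nodes; dedup happens once,
--     # at visit time. No queue, no per-node hop counter, no push-time visited filter.
--     order = []
--     seen = set()
--     level = list(seed_entities)
--     for _ in range(max_hops + 1):
--         new = []
--         for n in level:
--             if n not in seen:
--                 seen.add(n)
--                 new.append(n)
--         order += new
--         level = [m for n in new
--                    for m in ([t for _, t in graph.get(n, [])] +
--                              [h for _, h in reverse_graph.get(n, [])])]
--         if not level:
--             break
--     # Stage 2: emit all triplets in one comprehension over the visit order.
--     triplets = [t for n in order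
--                   for t in ([{'head_entity': n, 'relation': r, 'tail_entity': tl}
--                              for r, tl in graph.get(n, [])] +
--                             [{'head_entity': h, 'relation': r, 'tail_entity': n}
--                              for r, h in reverse_graph.get(n, [])])]
--     limit = top_k * len(seed_entities)
--     if len(triplets) > limit:
--         triplets = triplets[:limit]
--     return triplets
-- ===== Notes on version B (the rewrite author's own statement) =====
-- stated objective: alternative
-- what changed: Splits A's single interleaved queue-BFS (pop (entity,hops) pairs, emit triplets and push visited-filtered neighbors in one loop) into two staged passes: stage 1 computes only the visit order by expanding full unfiltered neighbor levels with dedup at visit time (no queue, no per-node hop counter, no push-time visited filter), stage 2 emits every triplet in one comprehension over that order, then truncates.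
import Mathlib
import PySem

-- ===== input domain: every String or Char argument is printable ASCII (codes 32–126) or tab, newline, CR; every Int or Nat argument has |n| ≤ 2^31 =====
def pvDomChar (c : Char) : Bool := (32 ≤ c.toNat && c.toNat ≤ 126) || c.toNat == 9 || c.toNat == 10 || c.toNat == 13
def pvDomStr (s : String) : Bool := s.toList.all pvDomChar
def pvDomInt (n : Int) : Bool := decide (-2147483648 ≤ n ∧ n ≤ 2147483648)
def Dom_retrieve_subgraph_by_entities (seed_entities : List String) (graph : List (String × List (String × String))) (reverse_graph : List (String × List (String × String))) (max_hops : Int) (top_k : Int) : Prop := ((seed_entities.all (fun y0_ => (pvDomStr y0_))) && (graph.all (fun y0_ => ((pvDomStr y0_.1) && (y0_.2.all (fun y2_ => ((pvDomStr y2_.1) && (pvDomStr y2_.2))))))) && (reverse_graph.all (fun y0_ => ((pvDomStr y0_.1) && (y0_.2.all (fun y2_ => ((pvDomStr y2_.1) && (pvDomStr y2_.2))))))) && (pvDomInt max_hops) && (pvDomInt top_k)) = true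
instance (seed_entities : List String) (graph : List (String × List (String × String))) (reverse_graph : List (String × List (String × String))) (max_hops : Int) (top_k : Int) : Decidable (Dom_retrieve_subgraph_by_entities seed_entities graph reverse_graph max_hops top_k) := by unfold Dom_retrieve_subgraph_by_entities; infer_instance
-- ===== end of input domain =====

-- B splits A's interleaved queue-BFS into two staged passes: first only the BFS visit
-- order (full unfiltered neighbor levels, dedup at visit time), then one comprehension
-- emitting every triplet from that order; same return value.

-- ===== PORT A =====

-- dict lookup graph.get(c) with default [] (Python's 'if c in graph: … graph[c]' loop body
-- runs over exactly this list); shared input accessor for both ports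
def adjOf (g : List (String × List (String × String))) (c : String) : List (String × String) :=
  ((PySem.Dict.mk g).get? c).getD []

-- facts cited by loopA's decreasing_by (termination only)
theorem pvContains_add_of_ne (s : PySem.Set String) (c k : String) (h : k ≠ c) :
    PySem.Set.contains (PySem.Set.add s c) k = PySem.Set.contains s k := by
  rcases hb : PySem.Set.contains s k with _ | _
  · rcases hb2 : PySem.Set.contains (PySem.Set.add s c) k with _ | _
    · rfl
    · exfalso
      have := (PySem.Set.contains_iff _ _).mp hb2
      rw [PySem.Set.mem_add] at this
      rcases this with h1 | h1
      · rw [← PySem.Set.contains_iff] at h1; rw [hb] at h1; cases h1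
      · exact h h1
  · exact (PySem.Set.contains_iff _ _).mpr
      ((PySem.Set.mem_add _ _ _).mpr (Or.inl ((PySem.Set.contains_iff _ _).mp hb)))

theorem pvContains_add_self (s : PySem.Set String) (c : String) :
    PySem.Set.contains (PySem.Set.add s c) c = true :=
  (PySem.Set.contains_iff _ _).mpr ((PySem.Set.mem_add _ _ _).mpr (Or.inr rfl))

theorem pvContains_add_mono (s : PySem.Set String) (c k : String)
    (h : PySem.Set.contains s k = true) :
    PySem.Set.contains (PySem.Set.add s c) k = true :=
  (PySem.Set.contains_iff _ _).mpr
    ((PySem.Set.mem_add _ _ _).mpr (Or.inl ((PySem.Set.contains_iff _ _).mp h)))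

theorem pvCountP_add_le (l : List String) (s : PySem.Set String) (c : String) :
    l.countP (fun k => !(PySem.Set.contains (PySem.Set.add s c) k)) ≤
      l.countP (fun k => !(PySem.Set.contains s k)) := by
  apply List.countP_mono_left
  intro a _ ha
  rcases hsa : PySem.Set.contains s a with _ | _
  · simp
  · exfalso
    rw [pvContains_add_mono s c a hsa] at ha; cases ha

theorem pvCountP_add_lt (l : List String) (s : PySem.Set String) (c : String)
    (hc : c ∈ l) (hs : PySem.Set.contains s c = false) :
    l.countP (fun k => !(PySem.Set.contains (PySem.Set.add s c) k)) <
      l.countP (fun k => !(PySem.Set.contains s k)) := by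
  induction l with
  | nil => cases hc
  | cons a t ih =>
    rw [List.countP_cons, List.countP_cons]
    rcases List.mem_cons.mp hc with h1 | h1
    · have ha : PySem.Set.contains (PySem.Set.add s c) a = true := by
        rw [← h1]; exact pvContains_add_self s c
      have hb : PySem.Set.contains s a = false := h1 ▸ hs
      rw [ha, hb]
      have h2 := pvCountP_add_le t s c
      have e1 : (if (!(true : Bool)) = true then 1 else 0) = 0 := rfl
      have e2 : (if (!(false : Bool)) = true then 1 else 0) = 1 := rfl
      rw [e1, e2]
      omega
    · have h2 := ih h1
      have h3 : (if (!(PySem.Set.contains (PySem.Set.add s c) a)) = true then 1 else 0) ≤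
          (if (!(PySem.Set.contains s a)) = true then 1 else 0) := by
        rcases hsa : PySem.Set.contains s a with _ | _
        · split <;> norm_num
        · rw [pvContains_add_mono s c a hsa]
      omega

theorem pvCountP_add_eq (l : List String) (s : PySem.Set String) (c : String) (hc : c ∉ l) :
    l.countP (fun k => !(PySem.Set.contains (PySem.Set.add s c) k)) =
      l.countP (fun k => !(PySem.Set.contains s k)) := by
  induction l with
  | nil => rfl
  | cons a t ih =>
    rw [List.countP_cons, List.countP_cons]
    rw [pvContains_add_of_ne s c a (fun h => hc (h ▸ List.mem_cons_self))]
    rw [ih (fun h => hc (List.mem_cons_of_mem _ h))]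

theorem pvAdjOf_nil (g : List (String × List (String × String))) (c : String)
    (hc : c ∉ g.map Prod.fst) : adjOf g c = [] := by
  unfold adjOf
  have : (PySem.Dict.mk g).contains c = false := by
    rcases h : (PySem.Dict.mk g).contains c with _ | _
    · rfl
    · exfalso
      have := (PySem.Dict.contains_iff_mem_keys _ _).mp h
      rw [PySem.Dict.keys_mk] at this
      exact hc this
  rw [(PySem.Dict.get?_eq_none_iff_contains _ _).mpr this]
  rfl

-- the while loop of A: FIFO queue of (entity, hops); pop from the front, push to the back
def loopA (graph reverse_graph : List (String × List (String × String))) (max_hops : Int)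
    (visited : PySem.Set String) (acc : List (List (String × String)))
    (queue : List (String × Int)) : List (List (String × String)) :=
  match queue with
  | [] => acc
  | (c, h) :: rest =>
    if PySem.Set.contains visited c || decide (h > max_hops) then
      loopA graph reverse_graph max_hops visited acc rest
    else
      let v' := PySem.Set.add visited c
      let p1 := (adjOf graph c).foldl
        (fun (st : List (List (String × String)) × List (String × Int)) rt =>
          (st.1 ++ [[("head_entity", c), ("relation", rt.1), ("tail_entity", rt.2)]],
           if PySem.Set.contains v' rt.2 then st.2 else st.2 ++ [(rt.2, h + 1)]))
        (acc, rest)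
      let p2 := (adjOf reverse_graph c).foldl
        (fun (st : List (List (String × String)) × List (String × Int)) rt =>
          (st.1 ++ [[("head_entity", rt.2), ("relation", rt.1), ("tail_entity", c)]],
           if PySem.Set.contains v' rt.2 then st.2 else st.2 ++ [(rt.2, h + 1)]))
        p1
      loopA graph reverse_graph max_hops v' p2.1 p2.2
termination_by
  (((graph.map Prod.fst ++ reverse_graph.map Prod.fst).countP
      (fun k => !(PySem.Set.contains visited k))), queue.length)
decreasing_by
  · apply Prod.Lex.right
    simp
  · rename_i hguard
    simp only [Bool.or_eq_true, decide_eq_true_eq, not_or] at hguard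
    have hvc : PySem.Set.contains visited c = false := by
      rcases h : PySem.Set.contains visited c with _ | _
      · rfl
      · exact absurd h hguard.1
    by_cases hc : c ∈ (graph.map Prod.fst ++ reverse_graph.map Prod.fst)
    · exact Prod.Lex.left _ _ (pvCountP_add_lt _ _ _ hc hvc)
    · rw [List.mem_append, not_or] at hc
      have h1 : adjOf graph c = [] := pvAdjOf_nil _ _ hc.1
      have h2 : adjOf reverse_graph c = [] := pvAdjOf_nil _ _ hc.2
      have hm := pvCountP_add_eq (graph.map Prod.fst ++ reverse_graph.map Prod.fst) visited c
        (by rw [List.mem_append, not_or]; exact hc)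
      rw [hm]
      apply Prod.Lex.right
      simp [h1, h2]

def retrieve_subgraph_by_entities (seed_entities : List String)
    (graph : List (String × List (String × String)))
    (reverse_graph : List (String × List (String × String)))
    (max_hops : Int) (top_k : Int) : List (List (String × String)) :=
  let subgraph_triplets := loopA graph reverse_graph max_hops PySem.Set.empty []
    (seed_entities.map (fun e => (e, (0 : Int))))
  if (subgraph_triplets.length : Int) > top_k * (seed_entities.length : Int) then
    PySem.List.slice subgraph_triplets none (some (top_k * (seed_entities.length : Int)))
  else subgraph_triplets

-- ===== PORT B =====

-- the full (unfiltered) neighbor list of a node: graph tails then reverse_graph heads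
def neighborsOf (graph reverse_graph : List (String × List (String × String))) (n : String) :
    List String :=
  (adjOf graph n).map Prod.snd ++ (adjOf reverse_graph n).map Prod.snd

-- the inner 'for n in level: if n not in seen: …' of stage 1
def freshFold (st : PySem.Set String × List String) (n : String) :
    PySem.Set String × List String :=
  if PySem.Set.contains st.1 n then st else (PySem.Set.add st.1 n, st.2 ++ [n])

-- stage 1 of B: the 'for _ in range(max_hops+1)' loop computing the visit order
def orderLoop (graph reverse_graph : List (String × List (String × String))) :
    Nat → PySem.Set String → List String → List String → List String
  | 0, _, order, _ => order
  | Nat.succ k, seen, order, level =>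
    let st := level.foldl freshFold (seen, [])
    let order' := order ++ st.2
    let level' := st.2.flatMap (neighborsOf graph reverse_graph)
    if level' = [] then order' else orderLoop graph reverse_graph k st.1 order' level'

-- stage 2 of B: one node's triplets (graph edges then reverse edges)
def emitNode (graph reverse_graph : List (String × List (String × String))) (n : String) :
    List (List (String × String)) :=
  (adjOf graph n).map
    (fun rt => [("head_entity", n), ("relation", rt.1), ("tail_entity", rt.2)]) ++
  (adjOf reverse_graph n).map
    (fun rt => [("head_entity", rt.2), ("relation", rt.1), ("tail_entity", n)])

def retrieve_subgraph_by_entities_alt (seed_entities : List String)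
    (graph : List (String × List (String × String)))
    (reverse_graph : List (String × List (String × String)))
    (max_hops : Int) (top_k : Int) : List (List (String × String)) :=
  let order := orderLoop graph reverse_graph (max_hops + 1).toNat PySem.Set.empty [] seed_entities
  let triplets := order.flatMap (emitNode graph reverse_graph)
  let limit := top_k * (seed_entities.length : Int)
  if (triplets.length : Int) > limit then PySem.List.slice triplets none (some limit)
  else triplets

-- ===== PRECONDITION & SPEC =====
def Spec_retrieve_subgraph_by_entities (seed_entities : List String) (graph : List (String × List (String × String))) (reverse_graph : List (String × List (String × String))) (max_hops : Int) (top_k : Int) (out : List (List (String × String))) : Prop := out = retrieve_subgraph_by_entities_alt seed_entities graph reverse_graph max_hops top_k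
instance (seed_entities : List String) (graph : List (String × List (String × String))) (reverse_graph : List (String × List (String × String))) (max_hops : Int) (top_k : Int) (out : List (List (String × String))) : Decidable (Spec_retrieve_subgraph_by_entities seed_entities graph reverse_graph max_hops top_k out) := by unfold Spec_retrieve_subgraph_by_entities; infer_instance

-- ===== CLAIM (what is proved, stated in full; the proofs are below) =====
def Claim_equal_retrieve_subgraph_by_entities : Prop := ∀ (seed_entities : List String) (graph : List (String × List (String × String))) (reverse_graph : List (String × List (String × String))) (max_hops : Int) (top_k : Int), Dom_retrieve_subgraph_by_entities seed_entities graph reverse_graph max_hops top_k → Spec_retrieve_subgraph_by_entities seed_entities graph reverse_graph max_hops top_k (retrieve_subgraph_by_entities seed_entities graph reverse_graph max_hops top_k)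

-- ===== LEMMAS AND PROOFS =====

-- 'l' padded inside 'l'' by extra elements already in S (A's push-time filter removes
-- exactly such elements relative to B's unfiltered level)
inductive Pad (S : PySem.Set String) : List String → List String → Prop
  | nil : Pad S [] []
  | cons (a : String) {l l' : List String} : Pad S l l' → Pad S (a :: l) (a :: l')
  | skip (a : String) {l l' : List String} :
      PySem.Set.contains S a = true → Pad S l l' → Pad S l (a :: l')

theorem pad_refl (S : PySem.Set String) (l : List String) : Pad S l l := by
  induction l with
  | nil => exact Pad.nil
  | cons a t ih => exact Pad.cons a ih

theorem pad_mono {S S' : PySem.Set String} {l l' : List String}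
    (hS : ∀ a, PySem.Set.contains S a = true → PySem.Set.contains S' a = true)
    (h : Pad S l l') : Pad S' l l' := by
  induction h with
  | nil => exact Pad.nil
  | cons a _ ih => exact Pad.cons a ih
  | skip a ha _ ih => exact Pad.skip a (hS a ha) ih

theorem pad_append {S : PySem.Set String} {l1 l1' l2 l2' : List String}
    (h1 : Pad S l1 l1') (h2 : Pad S l2 l2') : Pad S (l1 ++ l2) (l1' ++ l2') := by
  induction h1 with
  | nil => exact h2
  | cons a _ ih => exact Pad.cons a ih
  | skip a ha _ ih => exact Pad.skip a ha ih

theorem pad_filter (S : PySem.Set String) (l : List (String × String)) :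
    Pad S ((l.filter (fun rt => !PySem.Set.contains S rt.2)).map Prod.snd)
      (l.map Prod.snd) := by
  induction l with
  | nil => exact Pad.nil
  | cons rt t ih =>
    rcases h : PySem.Set.contains S rt.2 with _ | _
    · simp only [List.filter_cons, h, Bool.not_false, if_pos, List.map_cons]
      exact Pad.cons rt.2 ih
    · simp only [List.filter_cons, h, Bool.not_true, List.map_cons]
      exact Pad.skip rt.2 h ih

theorem pad_nil_right {S : PySem.Set String} {l : List String} (h : Pad S l []) : l = [] := by
  cases h; rfl

-- A's inner adjacency fold, characterized: triplets appended by map, queue by filter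
theorem pvFoldAdj (adj : List (String × String)) (f : String × String → List (String × String))
    (v' : PySem.Set String) (h : Int) :
    ∀ (ts : List (List (String × String))) (q : List (String × Int)),
    adj.foldl
      (fun (st : List (List (String × String)) × List (String × Int)) rt =>
        (st.1 ++ [f rt],
         if PySem.Set.contains v' rt.2 then st.2 else st.2 ++ [(rt.2, h + 1)]))
      (ts, q)
    = (ts ++ adj.map f,
       q ++ ((adj.filter (fun rt => !PySem.Set.contains v' rt.2)).map Prod.snd).map
          (fun x => (x, h + 1))) := by
  induction adj with
  | nil => intro ts q; simp
  | cons rt adj ih =>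
    intro ts q
    simp only [List.foldl_cons]
    rcases hv : PySem.Set.contains v' rt.2 with _ | _
    · simp only [Bool.false_eq_true, if_false]
      rw [ih, List.filter_cons]
      simp only [hv, Bool.not_false, if_true, List.map_cons, List.map_append,
        List.append_assoc, List.cons_append, List.nil_append, List.singleton_append]
    · simp only [if_true]
      rw [ih, List.filter_cons]
      simp only [hv, Bool.not_true, Bool.false_eq_true, if_false, List.map_cons,
        List.map_append, List.append_assoc, List.cons_append, List.nil_append,
        List.singleton_append]

-- freshFold order accumulation
theorem pvFreshAcc (front : List String) :
    ∀ (v : PySem.Set String) (o1 o2 : List String),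
    front.foldl freshFold (v, o1 ++ o2)
      = ((front.foldl freshFold (v, o2)).1, o1 ++ (front.foldl freshFold (v, o2)).2) := by
  induction front with
  | nil => intro v o1 o2; rfl
  | cons n front ih =>
    intro v o1 o2
    simp only [List.foldl_cons, freshFold]
    rcases hn : PySem.Set.contains v n with _ | _
    · simp only [hn, Bool.false_eq_true, if_false]
      rw [List.append_assoc]
      exact ih _ _ _
    · simp only [hn, if_true]
      exact ih _ _ _

-- orderLoop order accumulation
theorem pvOrderAcc (graph reverse_graph : List (String × List (String × String)))
    (fuel : Nat) :
    ∀ (s : PySem.Set String) (o1 o2 level : List String),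
    orderLoop graph reverse_graph fuel s (o1 ++ o2) level
      = o1 ++ orderLoop graph reverse_graph fuel s o2 level := by
  induction fuel with
  | zero => intro s o1 o2 level; rfl
  | succ k ih =>
    intro s o1 o2 level
    simp only [orderLoop]
    split
    · rw [List.append_assoc]
    · rw [List.append_assoc]
      exact ih _ _ _ _

-- draining: every queued entity has hop > max_hops, so A only pops and skips
theorem pvDrain (graph reverse_graph : List (String × List (String × String))) (max_hops : Int)
    (h : Int) (hh : h > max_hops) :
    ∀ (nx : List String) (v : PySem.Set String) (acc : List (List (String × String))),
    loopA graph reverse_graph max_hops v acc (nx.map (fun x => (x, h))) = acc := by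
  intro nx
  induction nx with
  | nil => intro v acc; rw [List.map_nil, loopA]
  | cons c nx ih =>
    intro v acc
    rw [List.map_cons, loopA]
    rw [if_pos (by simp [hh])]
    exact ih v acc

-- freshFold ignores elements already in a set the seen set contains
theorem pvPadFresh {S : PySem.Set String} {l l' : List String} (hp : Pad S l l') :
    ∀ (v : PySem.Set String) (o : List String),
    (∀ a, PySem.Set.contains S a = true → PySem.Set.contains v a = true) →
    l.foldl freshFold (v, o) = l'.foldl freshFold (v, o) := by
  induction hp with
  | nil => intro v o _; rfl
  | cons a _ ih =>
    intro v o hsub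
    simp only [List.foldl_cons, freshFold]
    rcases hn : PySem.Set.contains v a with _ | _
    · simp only [hn, Bool.false_eq_true, if_false]
      exact ih _ _ (fun b hb => pvContains_add_mono v a b (hsub b hb))
    · simp only [hn, if_true]
      exact ih _ _ hsub
  | skip a ha _ ih =>
    intro v o hsub
    simp only [List.foldl_cons, freshFold, hsub a ha, if_true]
    exact ih v o hsub

-- one level of A, by induction over the frontier: processing the frontier (tagged hop)
-- before a Pad-related tail queue equals B's freshFold pass, with the resulting queue
-- Pad-related to B's unfiltered next level
theorem pvInner (graph reverse_graph : List (String × List (String × String)))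
    (max_hops hop : Int) (hh : ¬ hop > max_hops) :
    ∀ (front : List String) (v : PySem.Set String) (acc : List (List (String × String)))
      (nxs nx' : List String), Pad v nxs nx' →
    ∃ nxs2 : List String,
      loopA graph reverse_graph max_hops v acc
          (front.map (fun x => (x, hop)) ++ nxs.map (fun x => (x, hop + 1)))
        = loopA graph reverse_graph max_hops (front.foldl freshFold (v, [])).1
            (acc ++ ((front.foldl freshFold (v, [])).2).flatMap
              (emitNode graph reverse_graph))
            (nxs2.map (fun x => (x, hop + 1)))
      ∧ Pad (front.foldl freshFold (v, [])).1 nxs2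
          (nx' ++ ((front.foldl freshFold (v, [])).2).flatMap
            (neighborsOf graph reverse_graph)) := by
  intro front
  induction front with
  | nil =>
    intro v acc nxs nx' hp
    refine ⟨nxs, by simp, ?_⟩
    simpa using hp
  | cons n front ih =>
    intro v acc nxs nx' hp
    rw [List.map_cons, List.cons_append, loopA]
    rcases hn : PySem.Set.contains v n with _ | _
    · -- fresh node
      rw [if_neg (by simp [hn, hh])]
      simp only [List.foldl_cons, freshFold, hn, Bool.false_eq_true, if_false,
        List.nil_append]
      rw [pvFoldAdj (adjOf graph n)
          (fun rt => [("head_entity", n), ("relation", rt.1), ("tail_entity", rt.2)])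
          (PySem.Set.add v n) hop]
      rw [pvFoldAdj (adjOf reverse_graph n)
          (fun rt => [("head_entity", rt.2), ("relation", rt.1), ("tail_entity", n)])
          (PySem.Set.add v n) hop]
      have hq : ((front.map (fun x => (x, hop)) ++ nxs.map (fun x => (x, hop + 1))) ++
            (((adjOf graph n).filter
                (fun rt => !PySem.Set.contains (PySem.Set.add v n) rt.2)).map Prod.snd).map
              (fun x => (x, hop + 1))) ++
            (((adjOf reverse_graph n).filter
                (fun rt => !PySem.Set.contains (PySem.Set.add v n) rt.2)).map Prod.snd).map
              (fun x => (x, hop + 1))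
          = front.map (fun x => (x, hop)) ++
            (nxs ++ (((adjOf graph n).filter
                (fun rt => !PySem.Set.contains (PySem.Set.add v n) rt.2)).map Prod.snd ++
              ((adjOf reverse_graph n).filter
                (fun rt => !PySem.Set.contains (PySem.Set.add v n) rt.2)).map Prod.snd)).map
              (fun x => (x, hop + 1)) := by
        simp
      rw [hq]
      have hpad : Pad (PySem.Set.add v n)
          (nxs ++ (((adjOf graph n).filter
              (fun rt => !PySem.Set.contains (PySem.Set.add v n) rt.2)).map Prod.snd ++
            ((adjOf reverse_graph n).filter
              (fun rt => !PySem.Set.contains (PySem.Set.add v n) rt.2)).map Prod.snd))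
          (nx' ++ neighborsOf graph reverse_graph n) :=
        pad_append (pad_mono (fun a ha => pvContains_add_mono v n a ha) hp)
          (pad_append (pad_filter _ _) (pad_filter _ _))
      obtain ⟨nxs2, heq, hpad2⟩ := ih (PySem.Set.add v n)
        ((acc ++ (adjOf graph n).map
            (fun rt => [("head_entity", n), ("relation", rt.1), ("tail_entity", rt.2)])) ++
          (adjOf reverse_graph n).map
            (fun rt => [("head_entity", rt.2), ("relation", rt.1), ("tail_entity", n)]))
        _ _ hpad
      have hacc := pvFreshAcc front (PySem.Set.add v n) [n] []
      simp only [List.append_nil] at hacc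
      refine ⟨nxs2, ?_, ?_⟩
      · rw [heq, hacc]
        simp [emitNode]
      · rw [hacc]
        simp only [List.flatMap_cons] at hpad2 ⊢
        simpa [List.append_assoc, neighborsOf] using hpad2
    · -- already visited: A pops and skips, B's freshFold skips
      rw [if_pos (by simp [hn])]
      simp only [List.foldl_cons, freshFold, hn, if_true]
      exact ih v acc nxs nx' hp

-- the whole while loop, by strong induction on the number of remaining hop levels
theorem pvMain (graph reverse_graph : List (String × List (String × String)))
    (max_hops : Int) :
    ∀ (fuel : Nat) (hop : Int) (v : PySem.Set String) (acc : List (List (String × String)))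
      (front front' : List String),
    (max_hops + 1 - hop).toNat = fuel → Pad v front front' →
    loopA graph reverse_graph max_hops v acc (front.map (fun x => (x, hop)))
      = acc ++ (orderLoop graph reverse_graph fuel v [] front').flatMap
          (emitNode graph reverse_graph) := by
  intro fuel
  induction fuel with
  | zero =>
    intro hop v acc front front' hfuel _
    rw [orderLoop]
    rw [pvDrain graph reverse_graph max_hops hop (by omega) front v acc]
    simp
  | succ k ih =>
    intro hop v acc front front' hfuel hp
    have hh : ¬ hop > max_hops := by omega
    obtain ⟨nxs2, heq, hpad2⟩ := pvInner graph reverse_graph max_hops hop hh front v acc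
      [] [] Pad.nil
    simp only [List.map_nil, List.append_nil, List.nil_append] at heq hpad2
    -- B's freshFold pass over front' computes the same (seen, new) as over front
    have hsame : front.foldl freshFold (v, ([] : List String))
        = front'.foldl freshFold (v, []) := pvPadFresh hp v [] (fun _ h => h)
    rw [orderLoop]
    rcases hlvl : ((front'.foldl freshFold (v, ([] : List String))).2).flatMap
        (neighborsOf graph reverse_graph) with _ | ⟨m, lvl⟩
    · -- B breaks: A's remaining queue must be empty too
      rw [if_pos rfl]
      rw [hsame, hlvl] at hpad2
      rw [pad_nil_right hpad2] at heq
      rw [heq, hsame]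
      rw [List.map_nil, loopA]
      simp
    · rw [if_neg (by simp)]
      rw [heq, hsame]
      rw [ih (hop + 1) (front'.foldl freshFold (v, [])).1
        (acc ++ ((front'.foldl freshFold (v, [])).2).flatMap (emitNode graph reverse_graph))
        nxs2 (m :: lvl) (by omega) (by rw [hsame, hlvl] at hpad2; exact hpad2)]
      rw [← hlvl]
      rw [show ([] ++ (front'.foldl freshFold (v, ([] : List String))).2)
          = ((front'.foldl freshFold (v, ([] : List String))).2 ++ []) from by simp]
      rw [pvOrderAcc graph reverse_graph k _ ((front'.foldl freshFold (v, [])).2) []]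
      simp

-- ===== VERDICT (by name: the statement is the Claim_ definition above) =====
theorem retrieve_subgraph_by_entities_spec : Claim_equal_retrieve_subgraph_by_entities := by
  intro seeds graph rg mh tk _
  unfold Spec_retrieve_subgraph_by_entities
  unfold retrieve_subgraph_by_entities retrieve_subgraph_by_entities_alt
  rw [pvMain graph rg mh (mh + 1).toNat 0 PySem.Set.empty [] seeds seeds
    (by omega) (pad_refl _ _)]
  rw [List.nil_append]
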